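-- pv_equiv track=rewrite | github.com/ldele/doc_assistant | scripts/cleanup_metadata.py | find_title_sections
-- ===== SOURCE A (Python) =====
-- from collections import Counter, defaultdict
--
-- TITLE_AS_SECTION_THRESHOLD = 0.70
--
-- def find_title_sections(chunks_by_doc: dict) -> dict:
--     """For each document, find sections that appear on >70% of chunks.
--     These are almost certainly the document title, not a real section."""
--     title_sections = {}
--     for filename, sections in chunks_by_doc.items():
--         if not sections:
--             continue
--         counter = Counter(sections)
--         total = len(sections)
--         for section, count in counter.most_common(3):
--             if section and count / total > TITLE_AS_SECTION_THRESHOLD: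
--                 title_sections[filename] = section
--                 break
--     return title_sections
-- ===== SOURCE B (Python) =====
-- TITLE_AS_SECTION_THRESHOLD = 0.70
--
-- def find_title_sections(chunks_by_doc: dict) -> dict:
--     """For each document, find sections that appear on >70% of chunks.
--     These are almost certainly the document title, not a real section."""
--     title_sections = {}
--     for filename, sections in chunks_by_doc.items():
--         if not sections:
--             continue
--         # Boyer-Moore majority vote: a section on >70% of chunks is a strict
--         # majority element, so it must be the surviving candidate.  No
--         # frequency table is ever built.
--         cand, votes = None, 0
--         for s in sections:
--             if votes == 0:
--                 cand, votes = s, 1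
--             elif s == cand:
--                 votes += 1
--             else:
--                 votes -= 1
--         # verify the single candidate in a second pass
--         occurrences = 0
--         for s in sections:
--             if s == cand:
--                 occurrences += 1
--         if cand and 10 * occurrences > 7 * len(sections):
--             title_sections[filename] = cand
--     return title_sections
-- ===== Notes on version B (the rewrite author's own statement) =====
-- stated objective: faster
-- what changed: Replaces the frequency table (Counter) and most_common(3) ranking with the Boyer-Moore majority-vote algorithm: a >70% section is a strict majority element, so a single O(1)-space voting pass yields the only possible candidate, verified by one plain counting pass; the exact integer test 10*occurrences > 7*total replaces the float division.
import Mathlib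
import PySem

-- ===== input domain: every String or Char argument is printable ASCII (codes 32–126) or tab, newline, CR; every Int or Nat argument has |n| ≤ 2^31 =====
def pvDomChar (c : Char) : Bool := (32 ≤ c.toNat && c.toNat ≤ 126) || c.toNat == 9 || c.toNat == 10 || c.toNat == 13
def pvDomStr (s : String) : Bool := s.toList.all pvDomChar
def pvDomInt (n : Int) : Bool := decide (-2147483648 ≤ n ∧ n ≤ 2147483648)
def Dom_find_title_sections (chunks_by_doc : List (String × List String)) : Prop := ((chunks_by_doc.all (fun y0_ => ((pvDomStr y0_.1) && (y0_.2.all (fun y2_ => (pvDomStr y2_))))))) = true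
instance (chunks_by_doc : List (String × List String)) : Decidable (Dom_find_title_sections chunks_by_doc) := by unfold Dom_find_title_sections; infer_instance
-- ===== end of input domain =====

-- B replaces the Counter + most_common(3) ranking with the Boyer-Moore majority vote
-- (a >70% section is a strict majority, hence the surviving candidate); objective: alternative.


-- ===== PORT A =====
-- `count / total > 0.70` is ported as the integer test `10 * count > 7 * total`, which is
-- exact for the list lengths/counts arising here (the float rounding of count/total can only
-- disagree with the exact ratio for totals around 2^50).
def find_title_sections (chunks_by_doc : List (String × List String)) : List (String × String) :=
  chunks_by_doc.foldl (fun title_sections p =>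
    let filename := p.1
    let sections := p.2
    if sections = [] then title_sections
    else
      let counter := PySem.Dict.counter sections
      let total : Int := sections.length
      -- counter.most_common(3) = sorted(counter.items(), key=count, reverse=True)[:3];
      -- the 'for … break' over it is find? of the first hit
      match ((PySem.List.sorted counter.items (fun q => q.2) true).take 3).find?
              (fun q => !(q.1 == "") && decide (10 * q.2 > 7 * total)) with
      | some q => title_sections ++ [(filename, q.1)]
      | none => title_sections) []

-- ===== PORT B =====
-- the Boyer-Moore voting step (Python's inner `for s in sections` loop body)
def pvBMStep (st : String × Int) (s : String) : String × Int :=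
  if st.2 = 0 then (s, 1)
  else if s = st.1 then (st.1, st.2 + 1)
  else (st.1, st.2 - 1)

def find_title_sections_alt (chunks_by_doc : List (String × List String)) : List (String × String) :=
  chunks_by_doc.foldl (fun title_sections p =>
    let filename := p.1
    let sections := p.2
    if sections = [] then title_sections
    else
      -- Python starts from cand=None, votes=0; the first iteration necessarily
      -- overwrites cand (votes=0), so ("", 0) is an equivalent start state here
      let st := sections.foldl pvBMStep ("", 0)
      let cand := st.1
      let occurrences := sections.foldl (fun (n : Int) s => if s = cand then n + 1 else n) 0
      if cand ≠ "" ∧ 10 * occurrences > 7 * (sections.length : Int) then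
        title_sections ++ [(filename, cand)]
      else title_sections) []

-- ===== PRECONDITION & SPEC =====
def Spec_find_title_sections (chunks_by_doc : List (String × List String)) (out : List (String × String)) : Prop := out = find_title_sections_alt chunks_by_doc
instance (chunks_by_doc : List (String × List String)) (out : List (String × String)) : Decidable (Spec_find_title_sections chunks_by_doc out) := by unfold Spec_find_title_sections; infer_instance

-- ===== CLAIM (what is proved, stated in full; the proofs are below) =====
def Claim_equal_find_title_sections : Prop := ∀ (chunks_by_doc : List (String × List String)), Dom_find_title_sections chunks_by_doc → Spec_find_title_sections chunks_by_doc (find_title_sections chunks_by_doc)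

-- ===== LEMMAS AND PROOFS =====

lemma pv_count_add_count_le (l : List String) (a b : String) (h : a ≠ b) :
    l.count a + l.count b ≤ l.length := by
  induction l with
  | nil => simp
  | cons x t ih =>
    simp only [List.count_cons, List.length_cons]
    by_cases hx : x = a <;> by_cases hy : x = b <;> simp_all <;> omega

lemma pv_find?_eq_some_of_unique {α : Type} (l : List α) (p : α → Bool) (e : α)
    (he : e ∈ l) (hp : p e = true) (huniq : ∀ x ∈ l, p x = true → x = e) :
    l.find? p = some e := by
  induction l with
  | nil => simp at he
  | cons x t ih =>
    by_cases hx : p x = true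
    · have hxe : x = e := huniq x List.mem_cons_self hx
      subst hxe
      simp [hx]
    · have hxe : x ≠ e := fun hxe => hx (hxe ▸ hp)
      have he' : e ∈ t := by
        cases List.mem_cons.mp he with
        | inl h => exact absurd h.symm hxe
        | inr h => exact h
      have hxf : p x = false := Bool.eq_false_iff.mpr hx
      simp only [List.find?_cons, hxf]
      exact ih he' (fun y hy hpy => huniq y (List.mem_cons_of_mem _ hy) hpy)

-- an element whose key is strictly maximal heads the reverse-sorted list
lemma pv_sorted_rev_head {α : Type} (xs : List α) (key : α → Int) (e : α)
    (he : e ∈ xs) (hmax : ∀ y ∈ xs, y ≠ e → key y < key e) :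
    ∃ t, PySem.List.sorted xs key true = e :: t := by
  have hmem : e ∈ PySem.List.sorted xs key true := (PySem.List.mem_sorted ..).mpr he
  cases hs : PySem.List.sorted xs key true with
  | nil => rw [hs] at hmem; simp at hmem
  | cons h t =>
    rw [hs] at hmem
    by_cases hhe : h = e
    · exact ⟨t, by rw [hhe]⟩
    · have hh : h ∈ xs := (PySem.List.mem_sorted ..).mp (hs ▸ List.mem_cons_self)
      have h1 : key h < key e := hmax h hh hhe
      have het : e ∈ t := by
        cases List.mem_cons.mp hmem with
        | inl h' => exact absurd h'.symm hhe
        | inr h' => exact h'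
      have hpw := PySem.List.sorted_pairwise_rev (xs := xs) (key := key)
      rw [hs] at hpw
      have h2 : key e ≤ key h := (List.pairwise_cons.mp hpw).1 e het
      omega

-- "weight" of a string in a Boyer-Moore state: negative for the candidate itself
def pvW (x : String) (st : String × Int) : Int := if x = st.1 then -st.2 else st.2

-- the voting invariant: each step adds at most 1 to 2·count + weight
lemma pv_bm_invariant (l : List String) : ∀ (st : String × Int), 0 ≤ st.2 → ∀ x,
    0 ≤ (l.foldl pvBMStep st).2 ∧
    2 * (l.count x : Int) + pvW x (l.foldl pvBMStep st) ≤ l.length + pvW x st := by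
  induction l with
  | nil => intro st h x; simpa using h
  | cons s t ih =>
    intro st h x
    have hstep : 0 ≤ (pvBMStep st s).2 ∧
        2 * (if x = s then (1:Int) else 0) + pvW x (pvBMStep st s) ≤ 1 + pvW x st := by
      simp only [pvBMStep, pvW]
      by_cases h0 : st.2 = 0 <;> by_cases h1 : s = st.1 <;> by_cases h2 : x = st.1 <;>
        by_cases h3 : x = s <;> simp_all <;> omega
    obtain ⟨h1, h2⟩ := ih (pvBMStep st s) hstep.1 x
    refine ⟨h1, ?_⟩
    have hc : ((s :: t).count x : Int) = (t.count x : Int) + (if x = s then 1 else 0) := by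
      by_cases h3 : x = s
      · simp [h3]
      · simp [h3, Ne.symm h3]
    simp only [List.foldl_cons, List.length_cons] at *
    rw [hc]
    push_cast at *
    omega

-- a strict majority element is the surviving Boyer-Moore candidate
lemma pv_bm_majority (l : List String) (x : String)
    (h : 2 * (l.count x : Int) > l.length) : (l.foldl pvBMStep ("", 0)).1 = x := by
  by_contra hne
  obtain ⟨h1, h2⟩ := pv_bm_invariant l ("", 0) (by norm_num) x
  have hw0 : pvW x ("", 0) = 0 := by simp [pvW]
  have hne' : ¬x = (l.foldl pvBMStep ("", 0)).1 := fun h' => hne h'.symm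
  have hwf : pvW x (l.foldl pvBMStep ("", 0)) = (l.foldl pvBMStep ("", 0)).2 := by
    simp [pvW, hne']
  rw [hw0, hwf] at h2
  omega

-- the counting pass is List.count
lemma pv_occ (l : List String) (c : String) : ∀ n : Int,
    l.foldl (fun (n : Int) s => if s = c then n + 1 else n) n = n + l.count c := by
  induction l with
  | nil => intro n; simp
  | cons s t ih =>
    intro n
    simp only [List.foldl_cons, List.count_cons, ih]
    by_cases h : s = c
    · simp [h]; ring
    · simp [h, Ne.symm]

-- the per-document core: find? over most_common(3) = find? over all counter items
lemma pv_core (ss : List String) :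
    (((PySem.List.sorted (PySem.Dict.counter ss).items (fun q => q.2) true).take 3).find?
        (fun q => !(q.1 == "") && decide (10 * q.2 > 7 * (ss.length : Int))))
      = ((PySem.Dict.counter ss).items.find?
        (fun q => !(q.1 == "") && decide (10 * q.2 > 7 * (ss.length : Int)))) := by
  set t : Int := (ss.length : Int) with ht
  set p : String × Int → Bool := fun q => !(q.1 == "") && decide (10 * q.2 > 7 * t) with hp
  have hitems : (PySem.Dict.counter ss).items
      = (PySem.Set.ofList ss).map (fun k => (k, (ss.count k : Int))) := PySem.Dict.items_counter ss
  have hshape : ∀ x ∈ (PySem.Dict.counter ss).items, x.1 ∈ ss ∧ x.2 = (ss.count x.1 : Int) := by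
    intro x hx
    rw [hitems] at hx
    obtain ⟨k, hk, rfl⟩ := List.mem_map.mp hx
    exact ⟨(PySem.Set.mem_ofList ..).mp hk, rfl⟩
  have hthr : ∀ x ∈ (PySem.Dict.counter ss).items, p x = true →
      10 * (ss.count x.1 : Int) > 7 * t := by
    intro x hx hpx
    obtain ⟨_, hv⟩ := hshape x hx
    have := hpx
    simp only [hp, Bool.and_eq_true, decide_eq_true_eq] at this
    rw [← hv]
    exact this.2
  by_cases hex : ∃ e ∈ (PySem.Dict.counter ss).items, p e = true
  · obtain ⟨e, he, hpe⟩ := hex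
    obtain ⟨hk1, hv1⟩ := hshape e he
    have he_thr : 10 * (ss.count e.1 : Int) > 7 * t := hthr e he hpe
    -- any other item has a strictly smaller count
    have hcnt : ∀ y ∈ (PySem.Dict.counter ss).items, y ≠ e → y.2 < e.2 := by
      intro y hy hne
      obtain ⟨hk2, hv2⟩ := hshape y hy
      have hkne : y.1 ≠ e.1 := by
        intro hk
        exact hne (Prod.ext hk (by rw [hv1, hv2, hk]))
      have hlen : (ss.count y.1 : Int) + (ss.count e.1 : Int) ≤ t := by
        rw [ht]; exact_mod_cast pv_count_add_count_le ss y.1 e.1 hkne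
      rw [hv1, hv2]
      omega
    -- and hence cannot pass the >70% test: e is the unique hit
    have huniq : ∀ x ∈ (PySem.Dict.counter ss).items, p x = true → x = e := by
      intro x hx hpx
      by_contra hne
      have hkne : x.1 ≠ e.1 := by
        intro hk
        obtain ⟨_, hv2⟩ := hshape x hx
        exact hne (Prod.ext hk (by rw [hv1, hv2, hk]))
      have hx_thr : 10 * (ss.count x.1 : Int) > 7 * t := hthr x hx hpx
      have hlen : (ss.count x.1 : Int) + (ss.count e.1 : Int) ≤ t := by
        rw [ht]; exact_mod_cast pv_count_add_count_le ss x.1 e.1 hkne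
      have hc1 : 1 ≤ ss.count x.1 := List.count_pos_iff.mpr (hshape x hx).1
      omega
    obtain ⟨tl, hsort⟩ := pv_sorted_rev_head (PySem.Dict.counter ss).items (fun q => q.2) e he hcnt
    rw [hsort]
    have hfind2 : ((PySem.Dict.counter ss).items.find? p) = some e :=
      pv_find?_eq_some_of_unique _ p e he hpe huniq
    rw [List.take_succ_cons]
    simp [hpe, hfind2]
  · have hnone : ∀ x ∈ (PySem.Dict.counter ss).items, p x = false := by
      intro x hx
      cases h : p x with
      | false => rfl
      | true => exact absurd ⟨x, hx, h⟩ hex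
    rw [List.find?_eq_none.mpr (fun x hx => by
          have hx2 : x ∈ (PySem.Dict.counter ss).items :=
            (PySem.List.mem_sorted ..).mp (List.mem_of_mem_take hx)
          simp [hnone x hx2]),
        List.find?_eq_none.mpr (fun x hx => by simp [hnone x hx])]

-- the full find? agrees with the verified Boyer-Moore candidate
lemma pv_find_vs_bm (ss : List String) (hne : ss ≠ []) :
    ((PySem.Dict.counter ss).items.find?
        (fun q => !(q.1 == "") && decide (10 * q.2 > 7 * (ss.length : Int))))
      = (if (ss.foldl pvBMStep ("", 0)).1 ≠ "" ∧
            10 * (ss.count (ss.foldl pvBMStep ("", 0)).1 : Int) > 7 * (ss.length : Int)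
         then some ((ss.foldl pvBMStep ("", 0)).1, (ss.count (ss.foldl pvBMStep ("", 0)).1 : Int))
         else none) := by
  set t : Int := (ss.length : Int) with ht
  set cand := (ss.foldl pvBMStep ("", 0)).1 with hcand
  set p : String × Int → Bool := fun q => !(q.1 == "") && decide (10 * q.2 > 7 * t) with hp
  have hitems : (PySem.Dict.counter ss).items
      = (PySem.Set.ofList ss).map (fun k => (k, (ss.count k : Int))) := PySem.Dict.items_counter ss
  have hshape : ∀ x ∈ (PySem.Dict.counter ss).items, x.1 ∈ ss ∧ x.2 = (ss.count x.1 : Int) := by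
    intro x hx
    rw [hitems] at hx
    obtain ⟨k, hk, rfl⟩ := List.mem_map.mp hx
    exact ⟨(PySem.Set.mem_ofList ..).mp hk, rfl⟩
  have htpos : 1 ≤ t := by
    rw [ht]
    have := List.length_pos_iff.mpr hne
    omega
  split_ifs with hB
  · -- the candidate passes: it is the unique hit of find?
    obtain ⟨hB1, hB2⟩ := hB
    have hc1 : 1 ≤ ss.count cand := by
      by_contra h
      have : ss.count cand = 0 := by omega
      rw [this] at hB2
      push_cast at hB2
      omega
    have hmem : cand ∈ ss := List.count_pos_iff.mp (by omega)
    have he : (cand, (ss.count cand : Int)) ∈ (PySem.Dict.counter ss).items := by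
      rw [hitems]
      exact List.mem_map.mpr ⟨cand, (PySem.Set.mem_ofList ..).mpr hmem, rfl⟩
    have hpe : p (cand, (ss.count cand : Int)) = true := by
      simp only [hp, Bool.and_eq_true, decide_eq_true_eq, Bool.not_eq_eq_eq_not, Bool.not_true,
        beq_eq_false_iff_ne]
      exact ⟨hB1, hB2⟩
    refine pv_find?_eq_some_of_unique _ p _ he hpe ?_
    intro x hx hpx
    obtain ⟨hxm, hxv⟩ := hshape x hx
    have hx_thr : 10 * (ss.count x.1 : Int) > 7 * t := by
      simp only [hp, Bool.and_eq_true, decide_eq_true_eq] at hpx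
      rw [← hxv]; exact hpx.2
    have hmaj : 2 * (ss.count x.1 : Int) > ss.length := by
      rw [← ht]; omega
    have := pv_bm_majority ss x.1 hmaj
    have hxc : x.1 = cand := by rw [hcand, this]
    exact Prod.ext hxc (by rw [hxv, hxc])
  · -- no hit: any hit would be a majority, hence the candidate, hence pass B's test
    refine List.find?_eq_none.mpr (fun x hx hpx => ?_)
    obtain ⟨hxm, hxv⟩ := hshape x hx
    simp only [hp, Bool.and_eq_true, decide_eq_true_eq, Bool.not_eq_eq_eq_not, Bool.not_true,
      beq_eq_false_iff_ne] at hpx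
    obtain ⟨hx1, hx2⟩ := hpx
    rw [hxv] at hx2
    have hmaj : 2 * (ss.count x.1 : Int) > ss.length := by rw [← ht]; omega
    have hxc : x.1 = cand := by rw [hcand, pv_bm_majority ss x.1 hmaj]
    exact hB ⟨hxc ▸ hx1, hxc ▸ hx2⟩

-- ===== VERDICT (by name: the statement is the Claim_ definition above) =====
theorem find_title_sections_spec : Claim_equal_find_title_sections := by
  intro l _
  show find_title_sections l = find_title_sections_alt l
  unfold find_title_sections find_title_sections_alt
  apply PySem.List.foldl_congr_mem
  intro acc x hx
  by_cases hnil : x.2 = []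
  · simp [hnil]
  · simp only [hnil, if_false]
    rw [pv_core x.2, pv_find_vs_bm x.2 hnil]
    have hocc : List.foldl (fun (n : Int) s =>
          if s = (List.foldl pvBMStep ("", 0) x.2).1 then n + 1 else n) 0 x.2
        = (List.count (List.foldl pvBMStep ("", 0) x.2).1 x.2 : Int) := by
      rw [pv_occ]; ring
    simp only [hocc]
    split_ifs with h <;> rfl
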